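-- pv_equiv track=rewrite | github.com/Memory17/GenCartMa | gencart_backend/sentiment_analysis/kaggle_loaders.py | get_priority_files
-- ===== SOURCE A (Python) =====
-- from typing import Optional, List
--
-- def get_priority_files(files: List[str]) -> List[str]:
--     # Prefer CSVs clearly containing reviews; typical main file name in this dataset is 'Dataset-SA.csv'
--     preferred = []
--     for name in files:
--         ln = name.lower()
--         if ln.endswith('.csv') and ('review' in ln or 'dataset-sa' in ln or 'flipkart' in ln):
--             preferred.append(name)
--     # Fallback: any CSV
--     others = [f for f in files if f.lower().endswith('.csv') and f not in preferred]
--     return preferred + others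
-- ===== SOURCE B (Python) =====
-- from typing import List
--
-- def get_priority_files(files: List[str]) -> List[str]:
--     # One pass: classify each CSV as preferred (keyword in lowered name) or other.
--     preferred = []
--     others = []
--     for name in files:
--         ln = name.lower()
--         if not ln.endswith('.csv'):
--             continue
--         if 'review' in ln or 'dataset-sa' in ln or 'flipkart' in ln:
--             preferred.append(name)
--         else:
--             others.append(name)
--     return preferred + others
-- ===== Notes on version B (the rewrite author's own statement) =====
-- stated objective: simpler
-- what changed: Single classifying pass appending each CSV to preferred or others, removing A's second full scan and its 'f not in preferred' list-membership test.
import Mathlib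
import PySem

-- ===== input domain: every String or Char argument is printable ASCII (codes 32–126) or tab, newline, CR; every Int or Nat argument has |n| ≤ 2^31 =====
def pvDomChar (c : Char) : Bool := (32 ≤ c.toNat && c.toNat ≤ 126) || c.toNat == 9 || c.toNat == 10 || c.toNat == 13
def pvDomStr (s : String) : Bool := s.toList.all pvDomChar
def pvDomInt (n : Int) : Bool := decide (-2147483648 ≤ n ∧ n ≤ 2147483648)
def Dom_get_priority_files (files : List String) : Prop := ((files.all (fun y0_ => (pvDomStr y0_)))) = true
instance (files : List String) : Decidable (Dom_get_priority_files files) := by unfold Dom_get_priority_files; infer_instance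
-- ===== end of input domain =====

-- B replaces A's second scan with `f not in preferred` by a single classifying pass (simpler decomposition).

-- ===== PORT A =====
def get_priority_files (files : List String) : List String :=
  let preferred := files.foldl (fun acc name =>
    let ln := PySem.Str.lower name
    if PySem.Str.endswith ln ".csv" &&
       (PySem.Str.isIn "review" ln || PySem.Str.isIn "dataset-sa" ln || PySem.Str.isIn "flipkart" ln)
    then acc ++ [name] else acc) []
  let others := files.filter (fun f =>
    PySem.Str.endswith (PySem.Str.lower f) ".csv" && !(preferred.contains f))
  preferred ++ others

-- ===== PORT B =====
def get_priority_files_alt (files : List String) : List String :=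
  let po := files.foldl (fun (po : List String × List String) name =>
    let ln := PySem.Str.lower name
    if !(PySem.Str.endswith ln ".csv") then po
    else if PySem.Str.isIn "review" ln || PySem.Str.isIn "dataset-sa" ln || PySem.Str.isIn "flipkart" ln
    then (po.1 ++ [name], po.2)
    else (po.1, po.2 ++ [name])) ([], [])
  po.1 ++ po.2

-- ===== PRECONDITION & SPEC =====
def Spec_get_priority_files (files : List String) (out : List String) : Prop := out = get_priority_files_alt files
instance (files : List String) (out : List String) : Decidable (Spec_get_priority_files files out) := by unfold Spec_get_priority_files; infer_instance

-- ===== CLAIM (what is proved, stated in full; the proofs are below) =====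
def Claim_equal_get_priority_files : Prop := ∀ (files : List String), Dom_get_priority_files files → Spec_get_priority_files files (get_priority_files files)

-- ===== LEMMAS AND PROOFS =====

-- the predicates: csv = lowered name ends with '.csv', key = a keyword occurs in the lowered name
def pvCsv (name : String) : Bool := PySem.Str.endswith (PySem.Str.lower name) ".csv"
def pvKey (name : String) : Bool :=
  let ln := PySem.Str.lower name
  PySem.Str.isIn "review" ln || PySem.Str.isIn "dataset-sa" ln || PySem.Str.isIn "flipkart" ln

-- A's first loop builds exactly the filter by csv ∧ key
theorem pvA_preferred (files : List String) :
    files.foldl (fun acc name =>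
      let ln := PySem.Str.lower name
      if PySem.Str.endswith ln ".csv" &&
         (PySem.Str.isIn "review" ln || PySem.Str.isIn "dataset-sa" ln || PySem.Str.isIn "flipkart" ln)
      then acc ++ [name] else acc) [] = files.filter (fun n => pvCsv n && pvKey n) := by
  simpa [pvCsv, pvKey] using
    PySem.List.foldl_append_if_eq_filter (l := files) (acc := [])
      (p := fun n => pvCsv n && pvKey n)

-- membership in the filtered list, for f drawn from files
theorem pvMem_filter_iff (files : List String) (f : String) (hf : f ∈ files) :
    (files.filter (fun n => pvCsv n && pvKey n)).contains f = (pvCsv f && pvKey f) := by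
  by_cases h : (pvCsv f && pvKey f) = true
  · simp [List.mem_filter, hf, h]
  · simp only [Bool.not_eq_true] at h
    simp [List.mem_filter, h]

-- B's loop step, with the Bool tests folded
def pvStep (po : List String × List String) (name : String) : List String × List String :=
  if pvCsv name then
    (if pvKey name then (po.1 ++ [name], po.2) else (po.1, po.2 ++ [name]))
  else po

-- the port's lambda is pvStep
theorem pvStep_eq :
    (fun (po : List String × List String) name =>
      let ln := PySem.Str.lower name
      if !(PySem.Str.endswith ln ".csv") then po
      else if PySem.Str.isIn "review" ln || PySem.Str.isIn "dataset-sa" ln || PySem.Str.isIn "flipkart" ln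
      then (po.1 ++ [name], po.2)
      else (po.1, po.2 ++ [name])) = pvStep := by
  funext po name
  simp only [pvStep, pvCsv, pvKey]
  cases h : PySem.Str.endswith (PySem.Str.lower name) ".csv" <;> simp

-- B's loop, with general accumulators
theorem pvB_loop (files : List String) (a b : List String) :
    files.foldl pvStep (a, b)
    = (a ++ files.filter (fun n => pvCsv n && pvKey n),
       b ++ files.filter (fun n => pvCsv n && !(pvKey n))) := by
  induction files generalizing a b with
  | nil => simp
  | cons x xs ih =>
    simp only [List.foldl_cons, List.filter_cons]
    cases hc : pvCsv x <;> cases hk : pvKey x <;>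
      simp [pvStep, hc, hk, ih]

-- ===== VERDICT (by name: the statement is the Claim_ definition above) =====
theorem get_priority_files_spec : Claim_equal_get_priority_files := by
  intro files _
  show get_priority_files files = get_priority_files_alt files
  unfold get_priority_files get_priority_files_alt
  rw [pvA_preferred, pvStep_eq, pvB_loop]
  simp only [List.nil_append]
  congr 1
  rw [List.filter_congr]
  intro f hf
  rw [pvMem_filter_iff files f hf]
  by_cases hc : pvCsv f = true
  · by_cases hk : pvKey f = true <;> simp [pvCsv, pvKey] at hc hk ⊢ <;> simp [hc, hk]
  · simp only [Bool.not_eq_true] at hc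
    simp [pvCsv] at hc ⊢; simp [hc]
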